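-- pv_equiv track=rewrite | github.com/dboone323/tools-automation | scripts/dependency_analyzer.py | _build_dependency_chains
-- ===== SOURCE A (Python) =====
-- from typing import Dict, Any, List, Set
--
-- def _build_dependency_chains(
--     dependency_graph: Dict[str, List[str]]
-- ) -> List[List[str]]:
--     """Build dependency chains from the graph"""
--     chains = []
--
--     def build_chain(start: str, current_chain: List[str], visited: Set[str]):
--         if start in visited:
--             return
--
--         current_chain.append(start)
--         visited.add(start)
--
--         # If this node has no dependencies, it's a chain end
--         dependencies = dependency_graph.get(start, [])
--         if not dependencies:
--             if len(current_chain) > 1:  # Only add chains with dependencies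
--                 chains.append(current_chain.copy())
--         else:
--             # Continue the chain with dependencies
--             for dep in dependencies:
--                 if dep not in current_chain:  # Avoid cycles
--                     build_chain(dep, current_chain, visited.copy())
--
--         current_chain.pop()
--
--     # Build chains starting from each node
--     for node in dependency_graph:
--         build_chain(node, [], set())
--
--     return chains
-- ===== SOURCE B (Python) =====
-- def _build_dependency_chains(dependency_graph):
--     """Build dependency chains from the graph (iterative DFS with an explicit stack)."""
--     chains = []
--     for start in dependency_graph:
--         stack = [(start, [start])]
--         while stack:
--             node, path = stack.pop()
--             deps = dependency_graph.get(node, [])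
--             if not deps:
--                 if len(path) > 1:
--                     chains.append(path)
--             else:
--                 for dep in reversed(deps):
--                     if dep not in path:
--                         stack.append((dep, path + [dep]))
--     return chains
-- ===== Notes on version B (the rewrite author's own statement) =====
-- stated objective: alternative
-- what changed: The recursive DFS with a shared mutated chain list and a copied visited set per call is replaced by an iterative DFS over an explicit stack of (node, path) states, pushing filtered dependencies in reverse so chains are emitted in the same order; the redundant visited set (always equal to set(path)) is dropped.
import Mathlib
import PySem

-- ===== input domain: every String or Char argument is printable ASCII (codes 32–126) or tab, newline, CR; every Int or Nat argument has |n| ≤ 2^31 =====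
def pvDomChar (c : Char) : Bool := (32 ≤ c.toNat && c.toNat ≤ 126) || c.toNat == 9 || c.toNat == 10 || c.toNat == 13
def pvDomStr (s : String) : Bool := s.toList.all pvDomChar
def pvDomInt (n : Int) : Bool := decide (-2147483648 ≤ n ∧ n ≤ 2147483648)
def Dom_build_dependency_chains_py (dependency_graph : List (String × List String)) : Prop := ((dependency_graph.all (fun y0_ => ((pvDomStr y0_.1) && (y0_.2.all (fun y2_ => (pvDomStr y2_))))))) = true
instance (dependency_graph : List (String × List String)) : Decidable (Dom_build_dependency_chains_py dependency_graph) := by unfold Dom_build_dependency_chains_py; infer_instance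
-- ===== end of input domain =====

-- B replaces A's recursive DFS (with a copied visited set per call) by an iterative DFS over an
-- explicit stack that tracks only the current path; same chains in the same order (objective: alternative).

-- ===== PORT A =====
-- dependency_graph.get(node, [])
def pvGet (d : PySem.Dict String (List String)) (node : String) : List String :=
  PySem.Dict.getD d node []

-- all node names occurring in the graph (keys and dependency values); only used to size the
-- fuel guards that make the ports' loops total — fuel is provably never exhausted (see lemmas)
def pvU (g : List (String × List String)) : List String :=
  g.flatMap (fun p => p.1 :: p.2)

-- build_chain(start, current_chain, visited), returning the chains it appends, in order
def pvBuildChain (d : PySem.Dict String (List String)) :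
    Nat → String → List String → PySem.Set String → List (List String)
  | 0, _, _, _ => []
  | fuel + 1, start, chain, visited =>
    if PySem.Set.contains visited start then []
    else
      let chain' := chain ++ [start]
      let visited' := PySem.Set.add visited start
      let deps := pvGet d start
      if deps.isEmpty then
        if 1 < chain'.length then [chain'] else []
      else
        deps.foldl (fun acc dep =>
          if chain'.contains dep then acc
          else acc ++ pvBuildChain d fuel dep chain' visited') []

def build_dependency_chains_py (dependency_graph : List (String × List String)) : List (List String) :=
  let d := PySem.Dict.ofList dependency_graph
  (PySem.Dict.keys d).foldl
    (fun chains node =>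
      chains ++ pvBuildChain d ((pvU dependency_graph).length + 1) node [] PySem.Set.empty) []

-- ===== PORT B =====
-- exponent for the stack-loop fuel guard (≥ 2 + the longest dependency list)
def pvBase (g : List (String × List String)) : Nat :=
  2 + (g.map (fun p => p.2.length)).foldl max 0

-- nodes of U not yet on the path (proof device used only to size the fuel guard)
def pvFree (U : List String) (path : List String) : Nat :=
  (U.filter (fun x => !path.contains x)).length

-- fuel guard for the stack loop: an upper bound on the number of loop iterations
def pvMeasure (g : List (String × List String)) (stack : List (String × List String)) : Nat :=
  (stack.map (fun s => pvBase g ^ pvFree (pvU g) s.2)).sum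

-- the 'while stack:' loop; head of the list = top of the stack
def pvLoop (d : PySem.Dict String (List String)) :
    Nat → List (String × List String) → List (List String) → List (List String)
  | 0, _, chains => chains
  | _ + 1, [], chains => chains
  | fuel + 1, (node, path) :: rest, chains =>
    let deps := pvGet d node
    if deps.isEmpty then
      pvLoop d fuel rest (if 1 < path.length then chains ++ [path] else chains)
    else
      pvLoop d fuel
        (deps.reverse.foldl
          (fun st dep => if path.contains dep then st else (dep, path ++ [dep]) :: st) rest)
        chains

def build_dependency_chains_py_alt (dependency_graph : List (String × List String)) : List (List String) :=
  let d := PySem.Dict.ofList dependency_graph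
  (PySem.Dict.keys d).foldl
    (fun chains start =>
      pvLoop d (pvMeasure dependency_graph [(start, [start])]) [(start, [start])] chains) []

-- ===== PRECONDITION & SPEC =====
def Spec_build_dependency_chains_py (dependency_graph : List (String × List String)) (out : List (List String)) : Prop := out = build_dependency_chains_py_alt dependency_graph
instance (dependency_graph : List (String × List String)) (out : List (List String)) : Decidable (Spec_build_dependency_chains_py dependency_graph out) := by unfold Spec_build_dependency_chains_py; infer_instance

-- ===== CLAIM (what is proved, stated in full; the proofs are below) =====
def Claim_equal_build_dependency_chains_py : Prop := ∀ (dependency_graph : List (String × List String)), Dom_build_dependency_chains_py dependency_graph → Spec_build_dependency_chains_py dependency_graph (build_dependency_chains_py dependency_graph)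

-- ===== LEMMAS AND PROOFS =====

-- fuel-free shape of one DFS tree: what both programs emit from state (node, path), path ending in node
def pvEmit (d : PySem.Dict String (List String)) :
    Nat → String → List String → List (List String)
  | 0, _, _ => []
  | fuel + 1, node, path =>
    let deps := pvGet d node
    if deps.isEmpty then
      if 1 < path.length then [path] else []
    else
      deps.foldl (fun acc dep =>
        if path.contains dep then acc
        else acc ++ pvEmit d fuel dep (path ++ [dep])) []

lemma pvFree_pos {U path : List String} {x : String} (hU : x ∈ U) (hx : x ∉ path) :
    0 < pvFree U path := by
  unfold pvFree
  have : x ∈ U.filter (fun x => !path.contains x) := by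
    simp [List.mem_filter, hU, hx]
  exact List.length_pos_of_mem this

lemma pvFree_append_lt {U path : List String} {x : String} (hU : x ∈ U) (hx : x ∉ path) :
    pvFree U (path ++ [x]) < pvFree U path := by
  unfold pvFree
  have he : U.filter (fun y => !(path ++ [x]).contains y)
      = (U.filter (fun y => !path.contains y)).filter (fun y => !(y == x)) := by
    rw [List.filter_filter]
    apply List.filter_congr
    intro y _
    simp only [List.contains_append, List.contains_cons, List.contains_nil]
    cases hp : path.contains y <;> cases hyx : (y == x) <;> simp_all
  rw [he]
  apply List.length_filter_lt_length_iff_exists.mpr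
  exact ⟨x, by simp [List.mem_filter, hU, hx], by simp⟩

-- A's recursion equals pvEmit whenever visited = set(chain) (the invariant A maintains)
lemma pvBuildChain_eq_emit (d : PySem.Dict String (List String)) :
    ∀ (f : Nat) (start : String) (chain : List String) (visited : PySem.Set String),
      (∀ x : String, x ∈ visited ↔ x ∈ chain) →
      pvBuildChain d f start chain visited =
        if chain.contains start then [] else pvEmit d f start (chain ++ [start]) := by
  intro f
  induction f with
  | zero =>
    intro start chain visited h
    simp only [pvBuildChain, pvEmit]
    split <;> rfl
  | succ f ih =>
    intro start chain visited h
    have hg : PySem.Set.contains visited start = chain.contains start := by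
      by_cases hs : start ∈ chain
      · simp [h, hs]
      · simp [hs]
        intro hc
        exact absurd ((h start).mp (by simpa using hc)) hs
    simp only [pvBuildChain, pvEmit, hg]
    by_cases hs : start ∈ chain
    · simp [hs]
    · have h' : ∀ x : String, x ∈ PySem.Set.add visited start ↔ x ∈ chain ++ [start] := by
        intro x
        rw [PySem.Set.mem_add]
        simp [h]
      simp only [List.contains_eq_mem, hs, decide_false, Bool.false_eq_true, if_false]
      by_cases hdeps : (pvGet d start).isEmpty
      · simp [hdeps]
      · simp only [hdeps, Bool.false_eq_true, if_false]
        apply PySem.List.foldl_congr_mem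
        intro acc dep _
        rw [ih dep (chain ++ [start]) (PySem.Set.add visited start) h']
        by_cases hd : dep ∈ chain ∨ dep = start <;> simp [hd]

-- pvEmit does not depend on the fuel once the fuel dominates the number of free nodes
lemma pvEmit_stable (d : PySem.Dict String (List String)) (U : List String)
    (hU : ∀ n dep, dep ∈ pvGet d n → dep ∈ U) :
    ∀ (f₁ f₂ : Nat) (node : String) (path : List String),
      pvFree U path ≤ f₁ → pvFree U path ≤ f₂ →
      pvEmit d (f₁ + 1) node path = pvEmit d (f₂ + 1) node path := by
  intro f₁
  induction f₁ with
  | zero =>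
    intro f₂ node path h1 h2
    simp only [pvEmit]
    by_cases hdeps : (pvGet d node).isEmpty
    · simp [hdeps]
    · simp only [hdeps, Bool.false_eq_true, if_false]
      apply PySem.List.foldl_congr_mem
      intro acc dep hdep
      by_cases hp : dep ∈ path
      · simp [hp]
      · exact absurd (pvFree_pos (hU node dep hdep) hp) (by omega)
  | succ f ih =>
    intro f₂ node path h1 h2
    conv_lhs => rw [pvEmit]
    conv_rhs => rw [pvEmit]
    by_cases hdeps : (pvGet d node).isEmpty
    · simp [hdeps]
    · simp only [hdeps, Bool.false_eq_true, if_false]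
      apply PySem.List.foldl_congr_mem
      intro acc dep hdep
      by_cases hp : dep ∈ path
      · simp [hp]
      · have hpos := pvFree_pos (hU node dep hdep) hp
        have hlt := pvFree_append_lt (hU node dep hdep) hp
        cases f₂ with
        | zero => omega
        | succ f₂' =>
          simp only [hp, decide_false, List.contains_eq_mem, Bool.false_eq_true, if_false]
          rw [ih f₂' dep (path ++ [dep]) (by omega) (by omega)]

-- pushing the filtered deps in reverse order prepends them in order
lemma pvPush_eq (path : List String) :
    ∀ (l : List String) (rest : List (String × List String)),
      l.reverse.foldl
        (fun st dep => if path.contains dep then st else (dep, path ++ [dep]) :: st) rest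
      = (l.filter (fun dep => !path.contains dep)).map (fun dep => (dep, path ++ [dep])) ++ rest := by
  intro l rest
  rw [List.foldl_reverse]
  induction l with
  | nil => rfl
  | cons a l ih =>
    simp only [List.foldr_cons, List.filter_cons]
    by_cases ha : a ∈ path <;> simp_all

lemma pv_flatMap_ite {α β : Type} (p : α → Bool) (g : α → List β) (l : List α) :
    l.flatMap (fun x => if p x then [] else g x) = (l.filter (fun x => !p x)).flatMap g := by
  induction l with
  | nil => rfl
  | cons a l ih =>
    by_cases ha : p a <;> simp [ha, ih]

-- unfolding pvEmit over the children states, at fuel = free nodes + 1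
lemma pvEmit_children (d : PySem.Dict String (List String)) (U : List String)
    (hU : ∀ n dep, dep ∈ pvGet d n → dep ∈ U)
    (node : String) (path : List String) (hne : (pvGet d node).isEmpty = false) :
    pvEmit d (pvFree U path + 1) node path
      = (((pvGet d node).filter (fun dep => !path.contains dep)).map
          (fun dep => (dep, path ++ [dep]))).flatMap
          (fun s => pvEmit d (pvFree U s.2 + 1) s.1 s.2) := by
  conv_lhs => rw [pvEmit]
  simp only [hne, Bool.false_eq_true, if_false]
  have hbody : (fun (acc : List (List String)) (dep : String) =>
        if path.contains dep then acc
        else acc ++ pvEmit d (pvFree U path) dep (path ++ [dep]))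
      = (fun acc dep => acc ++
          if path.contains dep then [] else pvEmit d (pvFree U path) dep (path ++ [dep])) := by
    funext acc dep
    split <;> simp
  rw [hbody, PySem.List.foldl_append_eq_flatMap, List.nil_append,
    pv_flatMap_ite, List.flatMap_map]
  apply List.flatMap_congr
  intro dep hdep
  have hmem : dep ∈ pvGet d node := List.mem_of_mem_filter hdep
  have hnp : dep ∉ path := by simpa using List.of_mem_filter hdep
  have hpos := pvFree_pos (hU node dep hmem) hnp
  have hlt := pvFree_append_lt (hU node dep hmem) hnp
  have : pvFree U path = (pvFree U path - 1) + 1 := by omega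
  rw [this, pvEmit_stable d U hU (pvFree U path - 1) (pvFree U (path ++ [dep])) dep
    (path ++ [dep]) (by omega) (by omega)]

-- the measure strictly drops when a state is replaced by its children
lemma pvChildren_measure (U : List String) (B : Nat) (path : List String)
    (deps : List String) (hB2 : 2 ≤ B) (hlen : deps.length + 2 ≤ B)
    (hdepsU : ∀ dep ∈ deps, dep ∈ U) :
    (((deps.filter (fun dep => !path.contains dep)).map
        (fun dep => (dep, path ++ [dep]))).map (fun s => B ^ pvFree U s.2)).sum
      < B ^ pvFree U path := by
  set ch := deps.filter (fun dep => !path.contains dep) with hch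
  by_cases hc : ch = []
  · simp [hc]
    exact Nat.pow_pos (by omega)
  · obtain ⟨dep0, hdep0⟩ := List.exists_mem_of_ne_nil ch hc
    have hdep0d : dep0 ∈ deps := List.mem_of_mem_filter hdep0
    have hdep0p : dep0 ∉ path := by simpa using List.of_mem_filter hdep0
    have hfpos : 0 < pvFree U path := pvFree_pos (hdepsU dep0 hdep0d) hdep0p
    have hbound : ∀ x ∈ (ch.map (fun dep => (dep, path ++ [dep]))).map
        (fun s => B ^ pvFree U s.2), x ≤ B ^ (pvFree U path - 1) := by
      intro x hx
      simp only [List.map_map, List.mem_map, Function.comp] at hx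
      obtain ⟨dep, hdep, rfl⟩ := hx
      have hd : dep ∈ deps := List.mem_of_mem_filter hdep
      have hp : dep ∉ path := by simpa using List.of_mem_filter hdep
      have := pvFree_append_lt (hdepsU dep hd) hp
      exact Nat.pow_le_pow_right (by omega) (by omega)
    have hsum := List.sum_le_card_nsmul _ _ hbound
    have hlen2 : ((ch.map (fun dep => (dep, path ++ [dep]))).map
        (fun s => B ^ pvFree U s.2)).length ≤ deps.length := by
      simp [hch, List.length_filter_le]
    have hXpos : 0 < B ^ (pvFree U path - 1) := Nat.pow_pos (by omega)
    have hpow : B ^ pvFree U path = B ^ (pvFree U path - 1) * B := by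
      rw [← pow_succ]
      congr 1
      omega
    calc (((ch.map (fun dep => (dep, path ++ [dep]))).map (fun s => B ^ pvFree U s.2))).sum
        ≤ _ • B ^ (pvFree U path - 1) := hsum
      _ = ((ch.map (fun dep => (dep, path ++ [dep]))).map (fun s => B ^ pvFree U s.2)).length
            * B ^ (pvFree U path - 1) := by rw [smul_eq_mul]
      _ ≤ deps.length * B ^ (pvFree U path - 1) := Nat.mul_le_mul_right _ hlen2
      _ < B * B ^ (pvFree U path - 1) := by
          apply Nat.mul_lt_mul_of_lt_of_le (by omega) (le_refl _) hXpos
      _ = B ^ pvFree U path := by rw [hpow, Nat.mul_comm]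

-- the stack loop computes the concatenation of the per-state DFS emissions
lemma pvLoop_spec (d : PySem.Dict String (List String)) (U : List String) (B : Nat)
    (hU : ∀ n dep, dep ∈ pvGet d n → dep ∈ U)
    (hB : ∀ n, (pvGet d n).length + 2 ≤ B) :
    ∀ (f : Nat) (stack : List (String × List String)) (chains : List (List String)),
      (stack.map (fun s => B ^ pvFree U s.2)).sum ≤ f →
      pvLoop d f stack chains
        = chains ++ stack.flatMap (fun s => pvEmit d (pvFree U s.2 + 1) s.1 s.2) := by
  have hB2 : 2 ≤ B := by have := hB ""; omega
  intro f
  induction f with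
  | zero =>
    intro stack chains h
    cases stack with
    | nil => simp [pvLoop]
    | cons s rest =>
      exfalso
      have : 0 < B ^ pvFree U s.2 := Nat.pow_pos (by omega)
      simp only [List.map_cons, List.sum_cons] at h
      omega
  | succ f ih =>
    intro stack chains h
    cases stack with
    | nil => simp [pvLoop]
    | cons s rest =>
      obtain ⟨node, path⟩ := s
      rw [pvLoop]
      simp only [List.map_cons, List.sum_cons] at h
      by_cases hdeps : (pvGet d node).isEmpty
      · have hrest : (rest.map (fun s => B ^ pvFree U s.2)).sum ≤ f := by
          have : 0 < B ^ pvFree U path := Nat.pow_pos (by omega)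
          omega
        simp only [hdeps, if_true]
        rw [ih rest _ hrest]
        conv_rhs => rw [List.flatMap_cons]
        conv_rhs => rw [pvEmit]
        simp only [hdeps, if_true]
        by_cases hl : 1 < path.length <;> simp [hl]
      · have hne : (pvGet d node).isEmpty = false := by simpa using hdeps
        simp only [hne, Bool.false_eq_true, if_false]
        rw [pvPush_eq]
        have hdepsU : ∀ dep ∈ pvGet d node, dep ∈ U := fun dep hd => hU node dep hd
        have hmeas := pvChildren_measure U B path (pvGet d node) hB2 (hB node) hdepsU
        have harg : ((((pvGet d node).filter (fun dep => !path.contains dep)).map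
              (fun dep => (dep, path ++ [dep])) ++ rest).map
              (fun s => B ^ pvFree U s.2)).sum ≤ f := by
          rw [List.map_append, List.sum_append]
          omega
        rw [ih _ _ harg]
        rw [List.flatMap_append, List.flatMap_cons]
        rw [← pvEmit_children d U hU node path hne]

lemma pv_mem_items_update {κ ν : Type} [BEq κ] [LawfulBEq κ] :
    ∀ (ps : List (κ × ν)) (d : PySem.Dict κ ν) (p : κ × ν),
      p ∈ (d.update ps).items → p ∈ d.items ∨ p ∈ ps := by
  intro ps
  induction ps with
  | nil => intro d p h; exact Or.inl (by simpa [PySem.Dict.update] using h)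
  | cons q qs ih =>
    intro d p h
    have h' : p ∈ ((d.insert q.1 q.2).update qs).items := by
      simpa [PySem.Dict.update] using h
    rcases ih (d.insert q.1 q.2) p h' with h'' | h''
    · rcases (PySem.Dict.mem_items_insert _ _ _ _).mp h'' with h3 | h3
      · right; simp [h3]
      · exact Or.inl h3.1
    · exact Or.inr (List.mem_cons_of_mem _ h'')

lemma pv_mem_items_ofList {κ ν : Type} [BEq κ] [LawfulBEq κ]
    (g : List (κ × ν)) (p : κ × ν) (h : p ∈ (PySem.Dict.ofList g).items) : p ∈ g := by
  rcases pv_mem_items_update g PySem.Dict.empty p h with h' | h'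
  · simp [PySem.Dict.empty] at h'
  · exact h'

lemma pvGet_cases (g : List (String × List String)) (n : String) :
    pvGet (PySem.Dict.ofList g) n = [] ∨ (n, pvGet (PySem.Dict.ofList g) n) ∈ g := by
  unfold pvGet
  rw [PySem.Dict.getD_eq_get?_getD]
  cases h : (PySem.Dict.ofList g).get? n with
  | none => simp
  | some deps =>
    right
    simp only [Option.getD_some]
    exact pv_mem_items_ofList g (n, deps) (PySem.Dict.mem_items_of_get?_eq_some _ h)

lemma pvGet_sub (g : List (String × List String)) :
    ∀ n dep, dep ∈ pvGet (PySem.Dict.ofList g) n → dep ∈ pvU g := by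
  intro n dep hdep
  rcases pvGet_cases g n with h | h
  · rw [h] at hdep; simp at hdep
  · unfold pvU
    rw [List.mem_flatMap]
    exact ⟨(n, pvGet (PySem.Dict.ofList g) n), h, by simp [hdep]⟩

lemma pvGet_len (g : List (String × List String)) :
    ∀ n, (pvGet (PySem.Dict.ofList g) n).length + 2 ≤ pvBase g := by
  intro n
  unfold pvBase
  rcases pvGet_cases g n with h | h
  · simp [h]
  · have : (pvGet (PySem.Dict.ofList g) n).length ∈ g.map (fun p => p.2.length) :=
      List.mem_map.mpr ⟨_, h, rfl⟩
    have := (PySem.List.le_foldl_max (g.map (fun p => p.2.length)) 0).2 _ this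
    omega

-- ===== VERDICT (by name: the statement is the Claim_ definition above) =====
theorem build_dependency_chains_py_spec : Claim_equal_build_dependency_chains_py := by
  intro g _dom
  unfold Spec_build_dependency_chains_py
  simp only [build_dependency_chains_py, build_dependency_chains_py_alt]
  apply PySem.List.foldl_congr_mem
  intro chains node _
  rw [pvBuildChain_eq_emit (PySem.Dict.ofList g) ((pvU g).length + 1) node [] PySem.Set.empty
    (by intro x; simp [PySem.Set.empty])]
  rw [pvLoop_spec (PySem.Dict.ofList g) (pvU g) (pvBase g) (pvGet_sub g) (pvGet_len g)
    (pvMeasure g [(node, [node])]) [(node, [node])] chains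
    (by unfold pvMeasure; exact Nat.le_refl _)]
  simp only [List.contains_nil, Bool.false_eq_true, if_false, List.nil_append,
    List.flatMap_cons, List.flatMap_nil, List.append_nil]
  rw [pvEmit_stable (PySem.Dict.ofList g) (pvU g) (pvGet_sub g)
    ((pvU g).length) (pvFree (pvU g) [node]) node [node]
    (List.length_filter_le _ _) (Nat.le_refl _)]
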